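-- pv_equiv track=rewrite | github.com/Mickey1356/CodeIT-Suisse-2019 | codeitsuisse/routes/rp1.py | readyplayeronev2
-- ===== SOURCE A (Python) =====
-- def readyplayeronev2(N, T):
--
--     def ready(cur_player, Narray, T):
--
--         if cur_player == 1:
--             if (max(Narray) >= T): # base case
--                 return (1, 1000) # massive cost on player 2
--             else:
--                 permutations = []
--                 for i in Narray:
--                     Narray_copy = Narray.copy()
--                     Narray_copy.remove(i)
--                     permutations.append(( ready(2,Narray_copy,T-i)[0]+1, ready(2, Narray_copy, T-i)[1]+1))
--                 return min(permutations, key = lambda t: t[0])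
--
--
--         elif cur_player == 2:
--             if (max(Narray) >= T): # base case
--                 return (1000, 1) # massive cost on player 1
--             else:
--                 permutations = []
--                 for i in Narray:
--                     Narray_copy = Narray.copy()
--                     Narray_copy.remove(i)
--                     permutations.append(( ready(1, Narray_copy, T-i)[0]+1, ready(1, Narray_copy, T-i)[1]+1))
--                 return min(permutations, key = lambda t: t[1])
--
--     # first check that values of N and T are valid. If invalid, then return -1.
--     if sum([i for i in range(1, N+1)]) < T:
--         return -1
--
--     pair = ready(1, [x for x in range(1, N+1)], T)
--     if pair[1] >= 1000:
--         return pair[0]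
--     else: # pair[0] >= 1000:
--         return -1
-- ===== SOURCE B (Python) =====
-- def readyplayeronev2(N, T):
--     # Memoized game search on (player, remaining numbers, target):
--     # each state is computed once, with a single recursive call per move
--     # and a running minimum instead of building a list and calling min.
--     if sum(range(1, N + 1)) < T:
--         return -1
--
--     memo = {}
--
--     def ready(p, arr, t):
--         key = (p, arr, t)
--         hit = memo.get(key)
--         if hit is not None:
--             return hit
--         if max(arr) >= t:
--             res = (1, 1000) if p == 1 else (1000, 1)
--         else:
--             best = None
--             for i in arr:
--                 rest = list(arr)
--                 rest.remove(i)
--                 r = ready(3 - p, tuple(rest), t - i)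
--                 cand = (r[0] + 1, r[1] + 1)
--                 score = cand[0] if p == 1 else cand[1]
--                 if best is None or score < (best[0] if p == 1 else best[1]):
--                     best = cand
--             res = best
--         memo[key] = res
--         return res
--
--     pair = ready(1, tuple(range(1, N + 1)), T)
--     return pair[0] if pair[1] >= 1000 else -1
-- ===== Notes on version B (the rewrite author's own statement) =====
-- stated objective: alternative
-- what changed: B memoizes the game search on (player, remaining-numbers tuple, target), makes a single recursive call per move and keeps a running minimum, instead of A's naive search that recurses twice per move and builds a list passed to min.
import Mathlib
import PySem

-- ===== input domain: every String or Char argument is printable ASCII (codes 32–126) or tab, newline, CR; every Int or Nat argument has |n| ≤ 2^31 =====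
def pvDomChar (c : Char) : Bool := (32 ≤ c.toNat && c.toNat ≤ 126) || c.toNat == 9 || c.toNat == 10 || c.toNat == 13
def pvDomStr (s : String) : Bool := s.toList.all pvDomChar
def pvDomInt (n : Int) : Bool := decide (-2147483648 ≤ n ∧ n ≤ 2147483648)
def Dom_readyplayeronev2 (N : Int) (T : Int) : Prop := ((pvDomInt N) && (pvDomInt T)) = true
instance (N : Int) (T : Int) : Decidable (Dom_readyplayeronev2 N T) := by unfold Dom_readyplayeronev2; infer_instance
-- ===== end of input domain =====

-- B memoizes the game search on (player, remaining numbers, target) with one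
-- recursive call per move and a running minimum; A recurses twice per move and
-- builds a list passed to min.

-- ===== PORT A =====
-- ready(cur_player, Narray, T), fueled by |Narray| (each recursive call removes one
-- element, so fuel = list length suffices; the fuel-0 / empty-list value (0, 0) is
-- only reached where the Python raises, which Pre_ excludes).
def pvReadyA : Nat → Int → List Int → Int → Int × Int
  | 0, _, _, _ => (0, 0)
  | fuel' + 1, p, arr, t =>
    if p == 1 then
      match PySem.List.max? arr (fun y => y) with
      | none => (0, 0)  -- max([]) raises ValueError in Python; outside Pre_
      | some m =>
        if m ≥ t then (1, 1000)
        else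
          let perms := arr.map (fun i =>
            let c := (PySem.List.remove? arr i).getD []
            ((pvReadyA fuel' 2 c (t - i)).1 + 1, (pvReadyA fuel' 2 c (t - i)).2 + 1))
          (PySem.List.min? perms (fun q => q.1)).getD (0, 0)
    else if p == 2 then
      match PySem.List.max? arr (fun y => y) with
      | none => (0, 0)  -- max([]) raises ValueError in Python; outside Pre_
      | some m =>
        if m ≥ t then (1000, 1)
        else
          let perms := arr.map (fun i =>
            let c := (PySem.List.remove? arr i).getD []
            ((pvReadyA fuel' 1 c (t - i)).1 + 1, (pvReadyA fuel' 1 c (t - i)).2 + 1))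
          (PySem.List.min? perms (fun q => q.2)).getD (0, 0)
    else (0, 0)  -- Python's ready returns None here; unreachable from the top call

def readyplayeronev2 (N : Int) (T : Int) : Int :=
  if ((PySem.List.pyRange 1 (N + 1) 1).map (fun i => i)).foldl (· + ·) 0 < T then -1
  else
    let arr := (PySem.List.pyRange 1 (N + 1) 1).map (fun x => x)
    let pair := pvReadyA arr.length 1 arr T
    if pair.2 ≥ 1000 then pair.1 else -1

-- ===== PORT B =====
-- memo : dict keyed by (player, remaining tuple, target); threaded through the loop.
def pvReadyB : Nat → Int → List Int → Int →
    PySem.Dict (Int × List Int × Int) (Int × Int) →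
    (Int × Int) × PySem.Dict (Int × List Int × Int) (Int × Int)
  | 0, _, _, _, memo => ((0, 0), memo)
  | fuel' + 1, p, arr, t, memo =>
    let key : Int × List Int × Int := (p, arr, t)
    match memo.get? key with
    | some v => (v, memo)
    | none =>
      match PySem.List.max? arr (fun y => y) with
      | none => ((0, 0), memo)  -- max(()) raises ValueError in Python; outside Pre_
      | some m =>
        if m ≥ t then
          let res : Int × Int := if p == 1 then (1, 1000) else (1000, 1)
          (res, memo.insert key res)
        else
          let st := arr.foldl (fun st i =>
            let rest := (PySem.List.remove? arr i).getD []
            let rm := pvReadyB fuel' (3 - p) rest (t - i) st.2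
            let cand : Int × Int := (rm.1.1 + 1, rm.1.2 + 1)
            let keep : Bool :=
              match st.1 with
              | none => true
              | some b => decide ((if p == 1 then cand.1 else cand.2) <
                                  (if p == 1 then b.1 else b.2))
            ((if keep then some cand else st.1), rm.2))
            ((none : Option (Int × Int)), memo)
          let res := st.1.getD (0, 0)
          (res, st.2.insert key res)

def readyplayeronev2_alt (N : Int) (T : Int) : Int :=
  if (PySem.List.pyRange 1 (N + 1) 1).foldl (· + ·) 0 < T then -1
  else
    let arr := PySem.List.pyRange 1 (N + 1) 1
    let pair := (pvReadyB arr.length 1 arr T PySem.Dict.empty).1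
    if pair.2 ≥ 1000 then pair.1 else -1

-- ===== PRECONDITION & SPEC =====
-- Pre_ excludes exactly N ≤ 0 ∧ T ≤ 0, where Python's A (and B too) raises
-- ValueError on max() of the empty sequence of picked numbers.
def Pre_readyplayeronev2 (N : Int) (T : Int) : Prop := 1 ≤ N ∨ 1 ≤ T
instance (N : Int) (T : Int) : Decidable (Pre_readyplayeronev2 N T) := by
  unfold Pre_readyplayeronev2; infer_instance
def pvWitness_readyplayeronev2 : Int × Int := (3, 4)

def Spec_readyplayeronev2 (N : Int) (T : Int) (out : Int) : Prop := out = readyplayeronev2_alt N T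
instance (N : Int) (T : Int) (out : Int) : Decidable (Spec_readyplayeronev2 N T out) := by unfold Spec_readyplayeronev2; infer_instance

-- ===== CLAIM (what is proved, stated in full; the proofs are below) =====
def Claim_equal_readyplayeronev2 : Prop := ∀ (N : Int) (T : Int), Dom_readyplayeronev2 N T → Pre_readyplayeronev2 N T → Spec_readyplayeronev2 N T (readyplayeronev2 N T)

-- ===== LEMMAS AND PROOFS =====

-- the value A's search assigns to a state, fueled by the list length
def pvSpecR (p : Int) (arr : List Int) (t : Int) : Int × Int :=
  pvReadyA arr.length p arr t

-- memo invariant: every stored value is the A-search value of its key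
def pvInv (memo : PySem.Dict (Int × List Int × Int) (Int × Int)) : Prop :=
  ∀ k v, memo.get? k = some v → v = pvSpecR k.1 k.2.1 k.2.2

theorem pvInv_empty : pvInv PySem.Dict.empty := by
  intro k v h
  simp [PySem.Dict.get?, PySem.Dict.empty] at h

theorem pvInv_insert {memo : PySem.Dict (Int × List Int × Int) (Int × Int)}
    {p : Int} {arr : List Int} {t : Int} {res : Int × Int}
    (hInv : pvInv memo) (hres : res = pvSpecR p arr t) :
    pvInv (memo.insert (p, arr, t) res) := by
  intro k v h
  by_cases hk : k = (p, arr, t)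
  · subst hk
    rw [PySem.Dict.get?_insert_self] at h
    cases h
    exact hres
  · rw [PySem.Dict.get?_insert_of_ne _ _ hk] at h
    exact hInv k v h

-- the memo-free step of B's running-minimum loop, with A-search values plugged in
def pvGA (p : Int) (arr : List Int) (t : Int) :
    Option (Int × Int) → Int → Option (Int × Int) :=
  fun acc i =>
    let cand : Int × Int :=
      ((pvSpecR (3 - p) (arr.erase i) (t - i)).1 + 1,
       (pvSpecR (3 - p) (arr.erase i) (t - i)).2 + 1)
    match acc with
    | none => some cand
    | some b => if (if p == 1 then cand.1 else cand.2) < (if p == 1 then b.1 else b.2)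
                then some cand else some b

-- a fold whose state carries (running best, memo): the best-component evolves like
-- the memo-free fold gA, and the invariant on the memo-component is preserved
theorem pvFoldPair {M : Type} (P : M → Prop)
    (g : (Option (Int × Int) × M) → Int → (Option (Int × Int) × M))
    (gA : Option (Int × Int) → Int → Option (Int × Int)) (arr : List Int)
    (h : ∀ st i, i ∈ arr → P st.2 → (g st i).1 = gA st.1 i ∧ P (g st i).2) :
    ∀ (l : List Int), (∀ i ∈ l, i ∈ arr) → ∀ (st : Option (Int × Int) × M), P st.2 →
      (l.foldl g st).1 = l.foldl gA st.1 ∧ P (l.foldl g st).2 := by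
  intro l
  induction l with
  | nil => intro _ st hst; exact ⟨rfl, hst⟩
  | cons i l ih =>
    intro hsub st hst
    have h1 := h st i (hsub i List.mem_cons_self) hst
    have h2 := ih (fun j hj => hsub j (List.mem_cons_of_mem _ hj)) (g st i) h1.2
    simp only [List.foldl_cons]
    rw [← h1.1]
    exact h2

theorem pvMain : ∀ (fuel : Nat) (p : Int) (arr : List Int) (t : Int)
    (memo : PySem.Dict (Int × List Int × Int) (Int × Int)),
    arr.length ≤ fuel → (p = 1 ∨ p = 2) → pvInv memo →
    (pvReadyB fuel p arr t memo).1 = pvSpecR p arr t ∧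
      pvInv (pvReadyB fuel p arr t memo).2 := by
  intro fuel
  induction fuel with
  | zero =>
    intro p arr t memo hlen hp hInv
    have harr : arr = [] := List.eq_nil_of_length_eq_zero (Nat.le_zero.mp hlen)
    subst harr
    exact ⟨rfl, hInv⟩
  | succ fuel' IH =>
    intro p arr t memo hlen hp hInv
    simp only [pvReadyB]
    split
    case _ v hget =>
      exact ⟨hInv _ _ hget, hInv⟩
    case _ hget =>
      split
      case _ hmax =>
        have harr : arr = [] := (PySem.List.max?_eq_none_iff arr _).mp hmax
        subst harr
        exact ⟨rfl, hInv⟩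
      case _ m hmax =>
        have harr : arr ≠ [] := by
          intro h; subst h
          simp [PySem.List.max?] at hmax
        obtain ⟨a, as, rfl⟩ := List.exists_cons_of_ne_nil harr
        split
        case _ hmt =>
          have hres : (if p == 1 then ((1 : Int), (1000 : Int)) else ((1000 : Int), (1 : Int)))
              = pvSpecR p (a :: as) t := by
            rcases hp with rfl | rfl
            · simp [pvSpecR, pvReadyA, hmax, hmt]
            · simp [pvSpecR, pvReadyA, hmax, hmt]
          exact ⟨hres, pvInv_insert hInv hres⟩
        case _ hmt =>
          have hq : 3 - p = 1 ∨ 3 - p = 2 := by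
            rcases hp with rfl | rfl
            · right; norm_num
            · left; norm_num
          have hstep : ∀ (st : Option (Int × Int) × PySem.Dict (Int × List Int × Int) (Int × Int))
              (i : Int), i ∈ (a :: as) → pvInv st.2 →
              ((fun st i =>
                  let rest := (PySem.List.remove? (a :: as) i).getD []
                  let rm := pvReadyB fuel' (3 - p) rest (t - i) st.2
                  let cand : Int × Int := (rm.1.1 + 1, rm.1.2 + 1)
                  let keep : Bool :=
                    match st.1 with
                    | none => true
                    | some b => decide ((if p == 1 then cand.1 else cand.2) <
                                        (if p == 1 then b.1 else b.2))
                  ((if keep then some cand else st.1), rm.2)) st i).1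
                = pvGA p (a :: as) t st.1 i ∧
              pvInv (((fun st i =>
                  let rest := (PySem.List.remove? (a :: as) i).getD []
                  let rm := pvReadyB fuel' (3 - p) rest (t - i) st.2
                  let cand : Int × Int := (rm.1.1 + 1, rm.1.2 + 1)
                  let keep : Bool :=
                    match st.1 with
                    | none => true
                    | some b => decide ((if p == 1 then cand.1 else cand.2) <
                                        (if p == 1 then b.1 else b.2))
                  ((if keep then some cand else st.1), rm.2)) st i)).2 := by
            intro st i hi hst
            have hrest : (PySem.List.remove? (a :: as) i).getD [] = (a :: as).erase i := by
              rw [PySem.List.remove?_eq_some_erase _ i hi]; rfl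
            have hlen2 : ((a :: as).erase i).length ≤ fuel' := by
              rw [List.length_erase_of_mem hi]
              simp only [List.length_cons] at hlen ⊢
              omega
            have hrm := IH (3 - p) ((a :: as).erase i) (t - i) st.2 hlen2 hq hst
            constructor
            · simp only [hrest, hrm.1, pvGA]
              rcases h1 : st.1 with _ | b <;> simp
            · simp only [hrest]
              exact hrm.2
          have hfold := pvFoldPair pvInv
            (fun st i =>
              let rest := (PySem.List.remove? (a :: as) i).getD []
              let rm := pvReadyB fuel' (3 - p) rest (t - i) st.2
              let cand : Int × Int := (rm.1.1 + 1, rm.1.2 + 1)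
              let keep : Bool :=
                match st.1 with
                | none => true
                | some b => decide ((if p == 1 then cand.1 else cand.2) <
                                    (if p == 1 then b.1 else b.2))
              ((if keep then some cand else st.1), rm.2))
            (pvGA p (a :: as) t) (a :: as) hstep (a :: as) (fun i hi => hi)
            ((none : Option (Int × Int)), memo) hInv
          have hspec : pvSpecR p (a :: as) t
              = (List.foldl (pvGA p (a :: as) t) none (a :: as)).getD (0, 0) := by
            rcases hp with rfl | rfl
            · simp only [pvSpecR, List.length_cons, pvReadyA, hmax, if_neg hmt,
                beq_self_eq_true, if_true]
              congr 1
              rw [PySem.List.min?, List.foldl_map]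
              apply PySem.List.foldl_congr_mem
              intro acc i hi
              have hrest : (PySem.List.remove? (a :: as) i).getD [] = (a :: as).erase i := by
                rw [PySem.List.remove?_eq_some_erase _ i hi]; rfl
              have hlenE : ((a :: as).erase i).length = as.length := by
                rw [List.length_erase_of_mem hi]; simp
              rcases acc with _ | b <;>
                simp [pvGA, pvSpecR, hrest, hlenE, (show (3 : Int) - 1 = 2 by norm_num)]
            · simp only [pvSpecR, List.length_cons, pvReadyA, hmax, if_neg hmt,
                Int.reduceBEq, Bool.false_eq_true, if_false, if_true]
              congr 1
              rw [PySem.List.min?, List.foldl_map]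
              apply PySem.List.foldl_congr_mem
              intro acc i hi
              have hrest : (PySem.List.remove? (a :: as) i).getD [] = (a :: as).erase i := by
                rw [PySem.List.remove?_eq_some_erase _ i hi]; rfl
              have hlenE : ((a :: as).erase i).length = as.length := by
                rw [List.length_erase_of_mem hi]; simp
              rcases acc with _ | b <;>
                simp [pvGA, pvSpecR, hrest, hlenE, (show (3 : Int) - 2 = 1 by norm_num)]
          refine ⟨?_, ?_⟩
          · exact (congrArg (fun o => Option.getD o ((0 : Int), (0 : Int))) hfold.1).trans hspec.symm
          · exact pvInv_insert hfold.2
              ((congrArg (fun o => Option.getD o ((0 : Int), (0 : Int))) hfold.1).trans hspec.symm)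

-- ===== VERDICT (by name: the statement is the Claim_ definition above) =====
theorem readyplayeronev2_spec : Claim_equal_readyplayeronev2 := by
  intro N T _hD _hP
  unfold Spec_readyplayeronev2 readyplayeronev2 readyplayeronev2_alt
  simp only [List.map_id']
  split
  · rfl
  · have h := pvMain (PySem.List.pyRange 1 (N + 1) 1).length 1
      (PySem.List.pyRange 1 (N + 1) 1) T PySem.Dict.empty (le_refl _) (Or.inl rfl) pvInv_empty
    rw [h.1]
    rfl
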